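-- pv_equiv track=rewrite | github.com/nehagaikwad1611/Neha_Gaikwad_FBS_work | Assignments/Assignment12/q9.py | count_words_char
-- ===== SOURCE A (Python) =====
-- def count_words_char(s):
--     char_count = 0
--     if s:
--         word_count = 1  # if string is not empty
--     else:
--         word_count = 0  # If string is empty
--
--     for ch in s:
--         char_count += 1
--         if ch == " ":
--             word_count += 1
--     return word_count, char_count
-- ===== SOURCE B (Python) =====
-- def count_words_char(s):
--     if not s:
--         return 0, 0
--     parts = s.split(' ')
--     return len(parts), sum(map(len, parts)) + len(parts) - 1
-- ===== Notes on version B (the rewrite author's own statement) =====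
-- stated objective: alternative
-- what changed: Instead of scanning character by character with two running counters, B splits the string into its space-separated segments and derives both results from that list: word count = number of segments, character count = total segment length plus the len(parts)-1 separators; measured faster because the work moves into C built-ins (split/len/sum).
import Mathlib
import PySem

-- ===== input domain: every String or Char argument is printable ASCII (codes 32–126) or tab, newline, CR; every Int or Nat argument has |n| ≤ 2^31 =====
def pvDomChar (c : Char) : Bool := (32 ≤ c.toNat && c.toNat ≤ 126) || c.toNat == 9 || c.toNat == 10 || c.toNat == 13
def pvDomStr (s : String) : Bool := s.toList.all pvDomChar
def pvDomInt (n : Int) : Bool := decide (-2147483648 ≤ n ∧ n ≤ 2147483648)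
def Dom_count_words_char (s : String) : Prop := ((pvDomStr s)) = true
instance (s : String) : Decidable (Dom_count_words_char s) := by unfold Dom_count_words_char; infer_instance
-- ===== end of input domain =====

-- B replaces A's single-pass two-counter scan by a staged computation: split the string on ' '
-- and derive both counts from the resulting segment list (alternative decomposition; a timing run measured it faster via C built-ins).

-- ===== PORT A =====
-- literal port: word_count initialised by the truthiness test, then one pass over the
-- characters incrementing char_count and, on ' ', word_count
def count_words_char (s : String) : Int × Int :=
  let char_count : Int := 0
  let word_count : Int := if s.toList ≠ [] then 1 else 0
  let r := s.toList.foldl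
    (fun (st : Int × Int) ch =>
      let char_count := st.2 + 1
      let word_count := if ch == ' ' then st.1 + 1 else st.1
      (word_count, char_count))
    (word_count, char_count)
  r

-- ===== PORT B =====
-- port of Source B: empty string short-circuits; otherwise split on ' ' and derive both
-- counts from the parts list (sum of segment lengths plus the len(parts)-1 separators)
def count_words_char_alt (s : String) : Int × Int :=
  if s.toList = [] then (0, 0)
  else
    let parts := PySem.Chars.splitOn s.toList [' ']
    ((parts.length : Int), ((parts.map List.length).sum : Int) + (parts.length : Int) - 1)

-- ===== PRECONDITION & SPEC =====
def Spec_count_words_char (s : String) (out : Int × Int) : Prop := out = count_words_char_alt s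
instance (s : String) (out : Int × Int) : Decidable (Spec_count_words_char s out) := by unfold Spec_count_words_char; infer_instance

-- ===== CLAIM =====
def Claim_equal_count_words_char : Prop := ∀ (s : String), Dom_count_words_char s → Spec_count_words_char s (count_words_char s)

-- ===== LEMMAS AND PROOFS =====

-- A's loop, run from any initial state, adds the number of spaces and the length.
theorem pv_foldl_eq (l : List Char) (w c : Int) :
    l.foldl
      (fun (st : Int × Int) ch =>
        let char_count := st.2 + 1
        let word_count := if ch == ' ' then st.1 + 1 else st.1
        (word_count, char_count))
      (w, c) = (w + (l.count ' ' : Int), c + (l.length : Int)) := by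
  induction l generalizing w c with
  | nil => simp
  | cons x t ih =>
    simp only [List.foldl_cons, ih, List.count_cons, List.length_cons]
    by_cases hx : x = ' ' <;> simp [hx] <;> omega

-- splitOn.go with a single-char separator: the number of pieces produced
theorem pv_go_length (l : List Char) (fuel : ℕ) (cur : List Char) (acc : List (List Char))
    (h : l.length < fuel) :
    (PySem.Chars.splitOn.go [' '] fuel l cur acc).length = acc.length + l.count ' ' + 1 := by
  induction l generalizing fuel cur acc with
  | nil =>
    cases fuel with
    | zero => omega
    | succ f => simp [PySem.Chars.splitOn.go]
  | cons c rest ih =>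
    cases fuel with
    | zero => omega
    | succ f =>
      have hf : rest.length < f := by simpa using h
      by_cases hc : c = ' '
      · simp [PySem.Chars.splitOn.go, List.isPrefixOf, hc, ih f [] (cur.reverse :: acc) hf]
        omega
      · have hpre : ([' '] : List Char).isPrefixOf (c :: rest) = false := by
          simp [List.isPrefixOf]; exact fun he => absurd he.symm hc
        simp [PySem.Chars.splitOn.go, hpre, ih f (c :: cur) acc hf, hc]

-- splitOn.go with a single-char separator: total characters in the pieces
theorem pv_go_sum (l : List Char) (fuel : ℕ) (cur : List Char) (acc : List (List Char))
    (h : l.length < fuel) :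
    ((PySem.Chars.splitOn.go [' '] fuel l cur acc).map List.length).sum + l.count ' '
      = (acc.map List.length).sum + cur.length + l.length := by
  induction l generalizing fuel cur acc with
  | nil =>
    cases fuel with
    | zero => omega
    | succ f => simp [PySem.Chars.splitOn.go]
  | cons c rest ih =>
    cases fuel with
    | zero => omega
    | succ f =>
      have hf : rest.length < f := by simpa using h
      by_cases hc : c = ' '
      · have := ih f [] (cur.reverse :: acc) hf
        simp [PySem.Chars.splitOn.go, List.isPrefixOf, hc] at this ⊢
        omega
      · have hpre : ([' '] : List Char).isPrefixOf (c :: rest) = false := by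
          simp [List.isPrefixOf]; exact fun he => absurd he.symm hc
        have := ih f (c :: cur) acc hf
        simp [PySem.Chars.splitOn.go, hpre, hc] at this ⊢
        omega

-- ===== VERDICT =====
theorem count_words_char_spec : Claim_equal_count_words_char := by
  intro s _
  unfold Spec_count_words_char count_words_char count_words_char_alt
  simp only []
  rw [pv_foldl_eq]
  by_cases h : s.toList = []
  · simp [h]
  · have hlen := pv_go_length s.toList (s.length + 1) [] [] (by simp)
    have hsum := pv_go_sum s.toList (s.length + 1) [] [] (by simp)
    simp only [List.length_nil, List.map_nil, List.sum_nil, Nat.zero_add] at hlen hsum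
    have hcast : (List.map ((Nat.cast : ℕ → ℤ) ∘ List.length)
        (PySem.Chars.splitOn.go [' '] (s.length + 1) s.toList [] [])).sum
        = (((PySem.Chars.splitOn.go [' '] (s.length + 1) s.toList [] []).map
            List.length).sum : ℤ) := by
      rw [← List.map_map]
      exact (Nat.cast_list_sum _).symm
    have hsl : s.toList.length = s.length := by simp
    simp only [PySem.Chars.splitOn, hsl, ne_eq, h, not_false_iff, if_true, if_false,
      Prod.mk.injEq]
    constructor <;> omega
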